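-- pv_equiv track=rewrite | github.com/jackkerouac/aphrodite | api/app/services/badge_processing/resolution_detector.py | _resolutions_compatible
-- ===== SOURCE A (Python) =====
-- def _resolutions_compatible(filename_res: str, stream_res: str) -> bool:
--     """Check if filename and stream resolutions are compatible"""
--     # Define compatibility groups
--     compatibility_groups = {
--         '4k': ['4k', '2160p'],
--         '2160p': ['4k', '2160p'],
--         '1440p': ['1440p'],
--         '1080p': ['1080p', 'fhd'],
--         'fhd': ['1080p', 'fhd'],
--         '720p': ['720p', 'hd'],
--         'hd': ['720p', 'hd'],
--         '576p': ['576p'],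
--         '480p': ['480p']
--     }
--
--     filename_lower = filename_res.lower()
--     stream_lower = stream_res.lower()
--
--     # Check if they're in the same compatibility group
--     for base_res, compatible_list in compatibility_groups.items():
--         if filename_lower in compatible_list and stream_lower in compatible_list:
--             return True
--
--     return False
-- ===== SOURCE B (Python) =====
-- def _resolutions_compatible(filename_res: str, stream_res: str) -> bool:
--     """Check if filename and stream resolutions are compatible (flat canonical-group lookup)."""
--     canonical_group = {
--         '4k': 'uhd', '2160p': 'uhd',
--         '1440p': '1440p',
--         '1080p': 'fhd', 'fhd': 'fhd',
--         '720p': 'hd', 'hd': 'hd',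
--         '576p': '576p',
--         '480p': '480p',
--     }
--     g1 = canonical_group.get(filename_res.lower())
--     g2 = canonical_group.get(stream_res.lower())
--     return g1 is not None and g1 == g2
-- ===== Notes on version B (the rewrite author's own statement) =====
-- stated objective: simpler
-- what changed: Replaces the loop over per-resolution compatibility lists (membership scans per group) with a single flat label-to-canonical-group dictionary: lowercase both labels, one .get() lookup each, compare the two group ids (both must be non-None).
import Mathlib
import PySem

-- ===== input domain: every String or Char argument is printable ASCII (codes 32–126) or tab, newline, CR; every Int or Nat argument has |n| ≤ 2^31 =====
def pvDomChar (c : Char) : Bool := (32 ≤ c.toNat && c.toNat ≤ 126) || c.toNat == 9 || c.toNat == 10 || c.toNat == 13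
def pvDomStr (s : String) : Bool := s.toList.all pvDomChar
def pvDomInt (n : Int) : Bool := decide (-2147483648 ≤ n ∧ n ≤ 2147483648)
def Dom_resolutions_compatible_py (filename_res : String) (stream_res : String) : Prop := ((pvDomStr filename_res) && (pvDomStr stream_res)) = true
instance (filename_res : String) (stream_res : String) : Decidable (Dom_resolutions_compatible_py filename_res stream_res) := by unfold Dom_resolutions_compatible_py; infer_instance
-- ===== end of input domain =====

-- B replaces A's loop over group lists with one flat label→group dictionary and two lookups (objective: simpler).

-- ===== PORT A =====
-- the compatibility_groups dict of A, in insertion order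
def pvGroupsA : List (String × List String) :=
  [("4k", ["4k", "2160p"]),
   ("2160p", ["4k", "2160p"]),
   ("1440p", ["1440p"]),
   ("1080p", ["1080p", "fhd"]),
   ("fhd", ["1080p", "fhd"]),
   ("720p", ["720p", "hd"]),
   ("hd", ["720p", "hd"]),
   ("576p", ["576p"]),
   ("480p", ["480p"])]

-- A's for-loop with early 'return True'
def pvLoopA (fl sl : String) : List (String × List String) → Bool
  | [] => false
  | (_, lst) :: rest => if lst.contains fl && lst.contains sl then true else pvLoopA fl sl rest

def resolutions_compatible_py (filename_res : String) (stream_res : String) : Bool :=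
  pvLoopA (PySem.Str.lower filename_res) (PySem.Str.lower stream_res) pvGroupsA

-- ===== PORT B =====
def pvCanonB : PySem.Dict String String :=
  PySem.Dict.mk
    [("4k", "uhd"), ("2160p", "uhd"),
     ("1440p", "1440p"),
     ("1080p", "fhd"), ("fhd", "fhd"),
     ("720p", "hd"), ("hd", "hd"),
     ("576p", "576p"),
     ("480p", "480p")]

def resolutions_compatible_py_alt (filename_res : String) (stream_res : String) : Bool :=
  let g1 := PySem.Dict.get? pvCanonB (PySem.Str.lower filename_res)
  let g2 := PySem.Dict.get? pvCanonB (PySem.Str.lower stream_res)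
  g1.isSome && (g1 == g2)

-- ===== PRECONDITION & SPEC =====
def Spec_resolutions_compatible_py (filename_res : String) (stream_res : String) (out : Bool) : Prop := out = resolutions_compatible_py_alt filename_res stream_res
instance (filename_res : String) (stream_res : String) (out : Bool) : Decidable (Spec_resolutions_compatible_py filename_res stream_res out) := by unfold Spec_resolutions_compatible_py; infer_instance

-- ===== CLAIM (what is proved, stated in full; the proofs are below) =====
def Claim_equal_resolutions_compatible_py : Prop := ∀ (filename_res : String) (stream_res : String), Dom_resolutions_compatible_py filename_res stream_res → Spec_resolutions_compatible_py filename_res stream_res (resolutions_compatible_py filename_res stream_res)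

-- ===== LEMMAS AND PROOFS =====

-- canonical-group lookup written as an if-chain (proof-side helper)
def pvCanonIf (s : String) : Option String :=
  if "4k" == s then some "uhd" else if "2160p" == s then some "uhd"
  else if "1440p" == s then some "1440p"
  else if "1080p" == s then some "fhd" else if "fhd" == s then some "fhd"
  else if "720p" == s then some "hd" else if "hd" == s then some "hd"
  else if "576p" == s then some "576p" else if "480p" == s then some "480p" else none

lemma pv_get_char (s : String) : PySem.Dict.get? pvCanonB s = pvCanonIf s := by
  by_cases h1 : s = "4k"
  · subst h1; decide
  by_cases h2 : s = "2160p"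
  · subst h2; decide
  by_cases h3 : s = "1440p"
  · subst h3; decide
  by_cases h4 : s = "1080p"
  · subst h4; decide
  by_cases h5 : s = "fhd"
  · subst h5; decide
  by_cases h6 : s = "720p"
  · subst h6; decide
  by_cases h7 : s = "hd"
  · subst h7; decide
  by_cases h8 : s = "576p"
  · subst h8; decide
  by_cases h9 : s = "480p"
  · subst h9; decide
  simp [PySem.Dict.get?, pvCanonB, pvCanonIf, List.find?_nil, Ne.symm h1, Ne.symm h2, Ne.symm h3, Ne.symm h4, Ne.symm h5, Ne.symm h6, Ne.symm h7, Ne.symm h8, Ne.symm h9]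

set_option maxHeartbeats 1000000 in
lemma pv_core_eq (a b : String) :
    pvLoopA a b pvGroupsA =
      (((PySem.Dict.get? pvCanonB a).isSome) && (PySem.Dict.get? pvCanonB a == PySem.Dict.get? pvCanonB b)) := by
  rw [pv_get_char, pv_get_char]
  by_cases ha1 : a = "4k"
  · subst ha1; simp only [pvLoopA, pvGroupsA, pvCanonIf]; simp; split_ifs <;> subst_vars <;> simp_all [eq_comm]
  by_cases ha2 : a = "2160p"
  · subst ha2; simp only [pvLoopA, pvGroupsA, pvCanonIf]; simp; split_ifs <;> subst_vars <;> simp_all [eq_comm]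
  by_cases ha3 : a = "1440p"
  · subst ha3; simp only [pvLoopA, pvGroupsA, pvCanonIf]; simp; split_ifs <;> subst_vars <;> simp_all [eq_comm]
  by_cases ha4 : a = "1080p"
  · subst ha4; simp only [pvLoopA, pvGroupsA, pvCanonIf]; simp; split_ifs <;> subst_vars <;> simp_all [eq_comm]
  by_cases ha5 : a = "fhd"
  · subst ha5; simp only [pvLoopA, pvGroupsA, pvCanonIf]; simp; split_ifs <;> subst_vars <;> simp_all [eq_comm]
  by_cases ha6 : a = "720p"
  · subst ha6; simp only [pvLoopA, pvGroupsA, pvCanonIf]; simp; split_ifs <;> subst_vars <;> simp_all [eq_comm]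
  by_cases ha7 : a = "hd"
  · subst ha7; simp only [pvLoopA, pvGroupsA, pvCanonIf]; simp; split_ifs <;> subst_vars <;> simp_all [eq_comm]
  by_cases ha8 : a = "576p"
  · subst ha8; simp only [pvLoopA, pvGroupsA, pvCanonIf]; simp; split_ifs <;> subst_vars <;> simp_all [eq_comm]
  by_cases ha9 : a = "480p"
  · subst ha9; simp only [pvLoopA, pvGroupsA, pvCanonIf]; simp; split_ifs <;> subst_vars <;> simp_all [eq_comm]
  have na : pvCanonIf a = none := by simp [pvCanonIf, Ne.symm ha1, Ne.symm ha2, Ne.symm ha3, Ne.symm ha4, Ne.symm ha5, Ne.symm ha6, Ne.symm ha7, Ne.symm ha8, Ne.symm ha9]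
  rw [na]
  simp [pvLoopA, pvGroupsA, ha1, ha2, ha3, ha4, ha5, ha6, ha7, ha8, ha9]

-- ===== VERDICT (by name: the statement is the Claim_ definition above) =====
theorem resolutions_compatible_py_spec : Claim_equal_resolutions_compatible_py := by
  intro f s _
  unfold Spec_resolutions_compatible_py resolutions_compatible_py resolutions_compatible_py_alt
  exact pv_core_eq (PySem.Str.lower f) (PySem.Str.lower s)
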